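-- pv_equiv track=rewrite | github.com/Havlong/DiscreteMath | maths/fifteen.py | is_gamilton
-- ===== SOURCE A (Python) =====
-- def is_gamilton(graph_to_check):
--     if len(graph_to_check) < 3:
--         return True
--     for i in range(len(graph_to_check)):
--         for j in range(len(graph_to_check)):
--             if i != j:
--                 count_a = 0
--                 count_b = 0
--                 for x in range(len(graph_to_check)):
--                     count_a += graph_to_check[i][x]
--                     count_b += graph_to_check[j][x]
--                     if i == x:
--                         count_a += 1
--                     if j == x:
--                         count_b += 1
--                 if count_a + count_b < len(graph_to_check):
--                     return False
--     return True
-- ===== SOURCE B (Python) =====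
-- def is_gamilton(graph_to_check):
--     n = len(graph_to_check)
--     if n < 3:
--         return True
--     degs = [sum(row[x] for x in range(n)) + 1 for row in graph_to_check]
--     m1 = min(degs)
--     degs.remove(m1)
--     m2 = min(degs)
--     return m1 + m2 >= n
-- ===== Notes on version B (the rewrite author's own statement) =====
-- stated objective: alternative
-- what changed: Replaces the all-pairs scan that recomputes both row sums for every ordered pair by computing each row's degree once and checking that the two smallest degrees sum to at least n.
import Mathlib
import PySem

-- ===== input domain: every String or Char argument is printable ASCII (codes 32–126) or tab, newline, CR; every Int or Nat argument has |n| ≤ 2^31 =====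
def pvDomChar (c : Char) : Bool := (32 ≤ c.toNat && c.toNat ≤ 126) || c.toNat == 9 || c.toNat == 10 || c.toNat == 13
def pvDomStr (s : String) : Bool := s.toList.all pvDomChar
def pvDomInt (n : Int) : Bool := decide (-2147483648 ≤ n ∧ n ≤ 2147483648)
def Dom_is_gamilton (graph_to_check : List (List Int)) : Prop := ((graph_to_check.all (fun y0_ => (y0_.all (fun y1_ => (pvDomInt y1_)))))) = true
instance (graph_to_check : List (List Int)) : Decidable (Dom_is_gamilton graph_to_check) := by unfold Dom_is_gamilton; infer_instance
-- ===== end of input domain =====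

-- B replaces A's all-pairs scan (which recomputes both row sums for every ordered pair)
-- by computing each row's degree once and checking that the two smallest degrees sum to at least n.


-- ===== PORT A =====
-- one step of the inner `for x` loop on one of the two counters (counter for vertex i)
def pairStep (graph_to_check : List (List Int)) (i : Int) (c : Int) (x : Int) : Int :=
  let c := c + PySem.List.pyGetD (PySem.List.pyGetD graph_to_check i []) x 0
  if i = x then c + 1 else c

def is_gamilton (graph_to_check : List (List Int)) : Bool :=
  let n : Int := graph_to_check.length
  if n < 3 then true
  else
    (PySem.List.pyRange 0 n 1).all (fun i =>
      (PySem.List.pyRange 0 n 1).all (fun j =>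
        if i ≠ j then
          let cc := (PySem.List.pyRange 0 n 1).foldl
            (fun (c : Int × Int) x => (pairStep graph_to_check i c.1 x, pairStep graph_to_check j c.2 x))
            (0, 0)
          !(cc.1 + cc.2 < n)
        else true))

-- ===== PORT B =====
def is_gamilton_alt (graph_to_check : List (List Int)) : Bool :=
  let n : Int := graph_to_check.length
  if n < 3 then true
  else
    let degs := graph_to_check.map (fun row =>
      ((PySem.List.pyRange 0 n 1).map (fun x => PySem.List.pyGetD row x 0)).sum + 1)
    let m1 := (PySem.List.min? degs (fun y => y)).getD 0
    let degs2 := (PySem.List.remove? degs m1).getD []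
    let m2 := (PySem.List.min? degs2 (fun y => y)).getD 0
    decide (n ≤ m1 + m2)

-- ===== PRECONDITION & SPEC =====
-- Pre_ excludes inputs where some row is shorter than the number n of rows: A indexes row[x]
-- for every x < n there and raises IndexError (when n < 3 no row is indexed, so no restriction).
def Pre_is_gamilton (graph_to_check : List (List Int)) : Prop :=
  3 ≤ graph_to_check.length → ∀ row ∈ graph_to_check, graph_to_check.length ≤ row.length
instance (graph_to_check : List (List Int)) : Decidable (Pre_is_gamilton graph_to_check) := by unfold Pre_is_gamilton; infer_instance
def pvWitness_is_gamilton : List (List Int) := [[0,1,1],[1,0,1],[1,1,0]]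

def Spec_is_gamilton (graph_to_check : List (List Int)) (out : Bool) : Prop := out = is_gamilton_alt graph_to_check
instance (graph_to_check : List (List Int)) (out : Bool) : Decidable (Spec_is_gamilton graph_to_check out) := by unfold Spec_is_gamilton; infer_instance

-- ===== CLAIM (what is proved, stated in full; the proofs are below) =====
def Claim_equal_is_gamilton : Prop := ∀ (graph_to_check : List (List Int)), Dom_is_gamilton graph_to_check → Pre_is_gamilton graph_to_check → Spec_is_gamilton graph_to_check (is_gamilton graph_to_check)

-- ===== LEMMAS AND PROOFS =====

-- the degree B stores for a row (sum over the first n entries, plus 1)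
def degS (n : Int) (row : List Int) : Int :=
  ((PySem.List.pyRange 0 n 1).map (fun x => PySem.List.pyGetD row x 0)).sum + 1

-- A's inner counter loop, run on a single counter, computes degS of that row
lemma foldl_pairStep (g : List (List Int)) (i : Int) (h0 : 0 ≤ i) (hi : i < (g.length : Int)) :
    (PySem.List.pyRange 0 (g.length : Int) 1).foldl (pairStep g i) 0
      = degS (g.length : Int) (PySem.List.pyGetD g i []) := by
  have hfun : pairStep g i = fun c x =>
      c + (PySem.List.pyGetD (PySem.List.pyGetD g i []) x 0 + if (x == i) = true then 1 else 0) := by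
    funext c x
    unfold pairStep
    by_cases h : i = x
    · simp [h]; ring
    · simp [h, Ne.symm h]
  rw [hfun, PySem.List.foldl_add, PySem.List.sum_map_add_int, PySem.List.sum_map_ite_one_zero,
    ← List.count_eq_countP, List.count_eq_one_of_mem (PySem.List.nodup_pyRange_one 0 _)
      (PySem.List.mem_pyRange_one.mpr ⟨h0, hi⟩)]
  unfold degS
  push_cast
  ring

-- two values sitting at distinct positions of l: the first minimum and the second minimum
-- bound every such pair from below, and are themselves such a pair
lemma pair_min_iff (l : List Int) (n : Int) (m1 m2 : Int)
    (hm1 : PySem.List.min? l (fun y => y) = some m1)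
    (hm2 : PySem.List.min? (l.erase m1) (fun y => y) = some m2) :
    (∀ p q : Nat, (_ : p < l.length) → (_ : q < l.length) → p ≠ q → n ≤ l[p] + l[q])
      ↔ n ≤ m1 + m2 := by
  have hm1mem : m1 ∈ l := PySem.List.min?_mem hm1
  have hm1min : ∀ y ∈ l, m1 ≤ y := PySem.List.min?_isMin hm1
  have hm2mem : m2 ∈ l.erase m1 := PySem.List.min?_mem hm2
  have hm2min : ∀ y ∈ l.erase m1, m2 ≤ y := PySem.List.min?_isMin hm2
  constructor
  · intro h
    have hi0 : l.idxOf m1 < l.length := List.idxOf_lt_length_of_mem hm1mem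
    have hval : l[l.idxOf m1] = m1 := List.getElem_idxOf hi0
    have herase : l.erase m1 = l.eraseIdx (l.idxOf m1) := List.erase_eq_eraseIdx_of_idxOf rfl
    rw [herase] at hm2mem
    obtain ⟨q, hq, hqne, hqval⟩ := List.mem_eraseIdx_iff_getElem.mp hm2mem
    have := h (l.idxOf m1) q hi0 hq (Ne.symm hqne)
    rw [hval, hqval] at this
    exact this
  · intro hn p q hp hq hpq
    have h1p : m1 ≤ l[p] := hm1min _ (List.getElem_mem hp)
    have h1q : m1 ≤ l[q] := hm1min _ (List.getElem_mem hq)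
    by_cases hbp : l[p] = m1
    · by_cases hbq : l[q] = m1
      · -- m1 occurs at the two distinct positions p and q, so m2 ≤ m1
        have hmem' : m1 ∈ l.eraseIdx p :=
          List.mem_eraseIdx_iff_getElem.mpr ⟨q, hq, hpq.symm, hbq⟩
        have hcnt : 2 ≤ l.count m1 := by
          have hperm := (List.getElem_cons_eraseIdx_perm hp).count_eq m1
          have : 0 < (l.eraseIdx p).count m1 := List.count_pos_iff.mpr hmem'
          simp [hbp] at hperm
          omega
        have : 0 < (l.erase m1).count m1 := by
          rw [List.count_erase_self]; omega
        have h2le : m2 ≤ m1 := hm2min _ (List.count_pos_iff.mp this)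
        omega
      · have h2q : m2 ≤ l[q] :=
          hm2min _ ((List.mem_erase_of_ne hbq).mpr (List.getElem_mem hq))
        omega
    · have h2p : m2 ≤ l[p] :=
        hm2min _ ((List.mem_erase_of_ne hbp).mpr (List.getElem_mem hp))
      omega

-- A's boolean, characterised as the all-distinct-pairs degree condition (for n ≥ 3)
lemma A_iff (g : List (List Int)) (h3 : ¬ ((g.length : Int) < 3)) :
    (is_gamilton g = true ↔
      ∀ p q : Nat, (hp : p < g.length) → (hq : q < g.length) → p ≠ q →
        (g.length : Int) ≤ degS (g.length : Int) g[p] + degS (g.length : Int) g[q]) := by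
  unfold is_gamilton
  simp only [h3, if_false, List.all_eq_true, PySem.List.mem_pyRange_one]
  constructor
  · intro h p q hp hq hpq
    have hi : (0 : Int) ≤ (p : Int) ∧ (p : Int) < (g.length : Int) := by
      constructor <;> [positivity; exact_mod_cast hp]
    have hj : (0 : Int) ≤ (q : Int) ∧ (q : Int) < (g.length : Int) := by
      constructor <;> [positivity; exact_mod_cast hq]
    have hne : (p : Int) ≠ (q : Int) := by exact_mod_cast hpq
    have := h (p : Int) hi (q : Int) hj
    rw [if_pos hne] at this
    rw [PySem.List.foldl_prod_mk, foldl_pairStep g _ hi.1 hi.2, foldl_pairStep g _ hj.1 hj.2] at this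
    simp only [Bool.not_eq_eq_eq_not, Bool.not_true, decide_eq_false_iff_not, not_lt] at this
    rw [PySem.List.pyGetD_eq_getElem g [] hi.1 hi.2, PySem.List.pyGetD_eq_getElem g [] hj.1 hj.2] at this
    simpa using this
  · intro h i hi j hj
    by_cases hne : i ≠ j
    · rw [if_pos hne]
      rw [PySem.List.foldl_prod_mk, foldl_pairStep g _ hi.1 hi.2, foldl_pairStep g _ hj.1 hj.2]
      simp only [Bool.not_eq_eq_eq_not, Bool.not_true, decide_eq_false_iff_not, not_lt]
      rw [PySem.List.pyGetD_eq_getElem g [] hi.1 hi.2, PySem.List.pyGetD_eq_getElem g [] hj.1 hj.2]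
      have hp : i.toNat < g.length := by omega
      have hq : j.toNat < g.length := by omega
      have hpq : i.toNat ≠ j.toNat := by omega
      exact h i.toNat j.toNat hp hq hpq
    · rw [if_neg hne]

-- ===== VERDICT (by name: the statement is the Claim_ definition above) =====
theorem is_gamilton_spec : Claim_equal_is_gamilton := by
  intro g _ _
  unfold Spec_is_gamilton
  by_cases h3 : (g.length : Int) < 3
  · unfold is_gamilton is_gamilton_alt
    simp [h3]
  · -- set up B's two minima
    set n : Int := (g.length : Int) with hn
    set degs : List Int := g.map (fun row =>
      ((PySem.List.pyRange 0 n 1).map (fun x => PySem.List.pyGetD row x 0)).sum + 1) with hdegs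
    have hlen : degs.length = g.length := by simp [hdegs]
    have hne : degs ≠ [] := by
      intro h; rw [h] at hlen; simp at hlen; omega
    obtain ⟨m1, hm1⟩ : ∃ m1, PySem.List.min? degs (fun y => y) = some m1 := by
      cases h : PySem.List.min? degs (fun y => y) with
      | none => exact absurd ((PySem.List.min?_eq_none_iff _ _).mp h) hne
      | some m => exact ⟨m, rfl⟩
    have hm1mem : m1 ∈ degs := PySem.List.min?_mem hm1
    have hrem : PySem.List.remove? degs m1 = some (degs.erase m1) :=
      PySem.List.remove?_eq_some_erase degs m1 hm1mem
    have hne2 : degs.erase m1 ≠ [] := by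
      intro h
      have := List.length_erase_of_mem hm1mem
      rw [h] at this; simp at this; omega
    obtain ⟨m2, hm2⟩ : ∃ m2, PySem.List.min? (degs.erase m1) (fun y => y) = some m2 := by
      cases h : PySem.List.min? (degs.erase m1) (fun y => y) with
      | none => exact absurd ((PySem.List.min?_eq_none_iff _ _).mp h) hne2
      | some m => exact ⟨m, rfl⟩
    have hB : is_gamilton_alt g = decide (n ≤ m1 + m2) := by
      unfold is_gamilton_alt
      rw [if_neg h3]
      simp only [← hdegs, ← hn, hm1, hrem, Option.getD_some, hm2]
    rw [Bool.eq_iff_iff, hB, A_iff g h3, decide_eq_true_eq]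
    have hdeg_get : ∀ (p : Nat) (hp : p < g.length),
        degS n g[p] = degs[p]'(by omega) := by
      intro p hp
      simp [hdegs, degS, List.getElem_map]
    constructor
    · intro h
      refine (pair_min_iff degs n m1 m2 hm1 hm2).mp ?_
      intro p q hp hq hpq
      have hp' : p < g.length := by omega
      have hq' : q < g.length := by omega
      have := h p q hp' hq' hpq
      rw [hdeg_get p hp', hdeg_get q hq'] at this
      exact this
    · intro h p q hp hq hpq
      rw [hdeg_get p hp, hdeg_get q hq]
      exact (pair_min_iff degs n m1 m2 hm1 hm2).mpr h p q (by omega) (by omega) hpq
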